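/- GENERATED by farm/mkstatement.py from design/units.tsv (unit `GifAddExtensionBlock.2`) and the assertions of Gif/Spec/Seg_GifAddExtensionBlock.lean — do not edit.
   THE STATEMENT of the proof unit `GifAddExtensionBlock.2`: segment 2 of `GifAddExtensionBlock` (26 instructions; entries 0x107ba6;
   exits 0x107c05,0x107c4d; ranges 0x107ba6-0x107c05,0x107c48-0x107c4d)
   takes each of its entry assertions to one of its exit assertions (`Gif.Spec.GifAddExtensionBlock.Seg2`), given the contracts of its callees.
   What the names mean: ProgX/Base/Spec/Basic.lean (the shared hypotheses), Gif/Spec/Seg_GifAddExtensionBlock.lean (the assertions). The theorem to prove: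
   `theorem GifAddExtensionBlock_2_ok : Gif.Spec.GifAddExtensionBlock_2.Statement`. -/
import Gif.Code
import Gif.Dec.All
import Gif.Labels
import Gif.Spec.Seg_GifAddExtensionBlock
import ProgX.Base.Spec.Heap
namespace Gif.Spec.GifAddExtensionBlock_2
open X86 X86.User Asan

/-- The statement of unit `GifAddExtensionBlock.2`. -/
def Statement : Prop :=
  ∀ (Lay : Layout) (_hLay : Lay.hi = 0x1000000) (μ : Microarch) (_hμ : UserX.MicroOK μ) (u₀ : State)
    (_hcode : HasCodeNat Lay u₀ Gif.L.GifAddExtensionBlock.entry Gif.Code.code_GifAddExtensionBlock.nat Gif.L.GifAddExtensionBlock.size)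
    (_h_malloc : ∀ (H : Heap) (rest : List Obj) (frames : List (Nat × FrameLayout)), Calls Lay μ ProgX.Base.WayInv (ProgX.Base.conv u₀) ProgX.Base.L.malloc.entry (ProgX.Base.Spec.malloc.spec H rest frames))
    (_h_asan_load8_noabort : Asan.SmallCheck Lay μ ProgX.Base.WayInv (ProgX.Base.CodeOK u₀) [.rax, .rcx, .rdx] 8 ProgX.Base.L.__asan_load8_noabort.entry)
    (_h_asan_load4_noabort : Asan.SmallCheck Lay μ ProgX.Base.WayInv (ProgX.Base.CodeOK u₀) [.rax, .rcx, .rdx] 4 ProgX.Base.L.__asan_load4_noabort.entry)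
    (_h_asan_store4_noabort : Asan.SmallCheck Lay μ ProgX.Base.WayInv (ProgX.Base.CodeOK u₀) [.rax, .rcx, .rdx] 4 ProgX.Base.L.__asan_store4_noabort.entry)
    (_h_asan_store8_noabort : Asan.SmallCheck Lay μ ProgX.Base.WayInv (ProgX.Base.CodeOK u₀) [.rax, .rcx, .rdx] 8 ProgX.Base.L.__asan_store8_noabort.entry),
    Gif.Spec.GifAddExtensionBlock.Seg2 Lay μ u₀

end Gif.Spec.GifAddExtensionBlock_2
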